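-- pv_equiv track=rewrite | github.com/michaelsoltys/IAA-Code | Problems/4.13/Solution-1/sks.py | sksWeightOnly
-- ===== SOURCE A (Python) =====
-- def sksWeightOnly(W,C):#weight array, cost
--     S = [True] + [False for j in range(1,C+1)]
--     for i in range(len(W)):
--         for j in range(C,0,-1):
--             if j>=W[i]:
--                 if S[j-W[i]]:
--                     S[j] = True
--     S = {i:S[i] for i in range(len(S))}
--     m = max([j for j in S if S[j]])
--     return m
-- ===== SOURCE B (Python) =====
-- def sksWeightOnly(W, C):
--     # top-down recursion on (item index, remaining capacity) with memoization,
--     # instead of A's bottom-up boolean table swept backwards per item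
--     memo = {}
--     def best(i, cap):
--         if i == len(W):
--             return 0
--         if (i, cap) in memo:
--             return memo[(i, cap)]
--         r = best(i + 1, cap)
--         if W[i] <= cap:
--             r = max(r, W[i] + best(i + 1, cap - W[i]))
--         memo[(i, cap)] = r
--         return r
--     return best(0, C)
-- ===== Notes on version B (the rewrite author's own statement) =====
-- stated objective: alternative
-- what changed: Replaces A's bottom-up boolean DP table swept backwards over all cells 0..C per item with a top-down memoized recursion best(i, cap) = max over skipping or taking item i, visiting only the (index, capacity) states actually reachable; it trades the dense array for a recursion tree plus a memo dictionary.
import Mathlib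
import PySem

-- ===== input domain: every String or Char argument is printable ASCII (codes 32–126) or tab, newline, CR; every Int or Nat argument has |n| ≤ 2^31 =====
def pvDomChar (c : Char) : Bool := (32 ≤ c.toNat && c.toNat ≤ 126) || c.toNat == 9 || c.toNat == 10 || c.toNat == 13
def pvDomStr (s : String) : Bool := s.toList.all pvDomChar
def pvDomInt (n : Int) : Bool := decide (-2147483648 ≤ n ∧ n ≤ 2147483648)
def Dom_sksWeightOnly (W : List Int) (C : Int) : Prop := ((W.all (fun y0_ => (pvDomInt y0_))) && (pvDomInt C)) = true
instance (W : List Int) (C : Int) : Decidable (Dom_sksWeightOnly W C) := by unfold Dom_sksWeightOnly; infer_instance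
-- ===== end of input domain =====

-- B replaces A's bottom-up boolean DP table (swept backwards over all cells per item)
-- with a top-down memoized recursion on (item index, remaining capacity); return values
-- agree wherever A returns.

-- ===== PORT A =====
-- inner loop 'for j in range(C,0,-1): if j>=W[i]: if S[j-W[i]]: S[j]=True'
-- (pyGetD stands for S[j-W[i]]: the index is ≥ 0 under the guard j ≥ w, and Pre_ excludes
--  the inputs where Python's read would be out of range and raise IndexError)
def innerA (w C : Int) (S : List Bool) : List Bool :=
  (PySem.List.pyRange C 0 (-1)).foldl
    (fun S j =>
      if j ≥ w then
        (if PySem.List.pyGetD S (j - w) false then S.set j.toNat true else S)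
      else S) S

-- 'for i in range(len(W))' with i used only as W[i]: folded over W directly
def sksWeightOnly (W : List Int) (C : Int) : Int :=
  let S0 : List Bool := true :: (PySem.List.pyRange 1 (C + 1) 1).map (fun _ => false)
  let S := W.foldl (fun S w => innerA w C S) S0
  -- S = {i: S[i] for i in range(len(S))}; m = max([j for j in S if S[j]])
  let trues := (PySem.List.pyRange 0 (S.length : Int) 1).filter
                 (fun j => PySem.List.pyGetD S j false)
  (PySem.List.max? trues (fun x => x)).getD 0   -- trues is never empty (S[0] stays True)

-- ===== PORT B =====
-- 'def best(i, cap): …' with the enclosing memo dict threaded through explicitly.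
-- Python's base test 'i == len(W)' is written 'len(W) ≤ i' (equivalent on every call the
-- program makes: i only counts up from 0 and stops at len(W)); W[i] under i < len(W) is pyGetD.
def bestGo (W : List Int) (i : Nat) (cap : Int) (memo : PySem.Dict (Int × Int) Int) :
    Int × PySem.Dict (Int × Int) Int :=
  if _h : W.length ≤ i then (0, memo)
  else
    match memo.get? ((i : Int), cap) with
    | some v => (v, memo)
    | none =>
      let p1 := bestGo W (i + 1) cap memo                 -- r = best(i+1, cap)
      let w := PySem.List.pyGetD W (i : Int) 0            -- W[i]
      let p2 := if w ≤ cap then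
          let q := bestGo W (i + 1) (cap - w) p1.2        -- best(i+1, cap-W[i])
          (max p1.1 (w + q.1), q.2)                       -- r = max(r, W[i] + …)
        else p1
      (p2.1, p2.2.insert ((i : Int), cap) p2.1)           -- memo[(i,cap)] = r
termination_by W.length - i
decreasing_by all_goals omega

def sksWeightOnly_alt (W : List Int) (C : Int) : Int :=
  (bestGo W 0 C PySem.Dict.empty).1                       -- return best(0, C)

-- ===== PRECONDITION & SPEC =====
-- Pre_ excludes exactly the inputs where A raises IndexError: C ≥ 1 together with a
-- negative weight makes S[j-W[i]] index past the end of S.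
def Pre_sksWeightOnly (W : List Int) (C : Int) : Prop := C ≤ 0 ∨ ∀ w ∈ W, 0 ≤ w
instance (W : List Int) (C : Int) : Decidable (Pre_sksWeightOnly W C) := by
  unfold Pre_sksWeightOnly; infer_instance

def pvWitness_sksWeightOnly : List Int × Int := ([2, 3], 4)

def Spec_sksWeightOnly (W : List Int) (C : Int) (out : Int) : Prop := out = sksWeightOnly_alt W C
instance (W : List Int) (C : Int) (out : Int) : Decidable (Spec_sksWeightOnly W C out) := by
  unfold Spec_sksWeightOnly; infer_instance

-- ===== CLAIM (what is proved, stated in full; the proofs are below) =====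
def Claim_equal_sksWeightOnly : Prop := ∀ (W : List Int) (C : Int), Dom_sksWeightOnly W C → Pre_sksWeightOnly W C → Spec_sksWeightOnly W C (sksWeightOnly W C)

-- ===== LEMMAS AND PROOFS =====

-- ---------- proof-side ghosts ----------

-- the memo-free functional content of B's recursion
def bestR : List Int → Int → Int
  | [], _ => 0
  | w :: ws, cap => if w ≤ cap then max (bestR ws cap) (w + bestR ws (cap - w)) else bestR ws cap

-- all subset sums of W (ghost, exponential: proofs only)
def allSums : List Int → List Int
  | [] => [0]
  | w :: ws => allSums ws ++ (allSums ws).map (fun s => w + s)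

-- ghost set-step: the sums reachable after one more item, capped at C
def addsB (w C : Int) (R : PySem.Set Int) : PySem.Set Int :=
  R.foldl (fun A r => if r + w ≤ C then PySem.Set.add A (r + w) else A) ([] : PySem.Set Int)

-- ---------- B side: memoization is sound ----------

def GoodMemo (W : List Int) (memo : PySem.Dict (Int × Int) Int) : Prop :=
  ∀ k v, memo.get? k = some v → ∃ i : Nat, k.1 = (i : Int) ∧ v = bestR (W.drop i) k.2

theorem goodMemo_empty (W : List Int) : GoodMemo W PySem.Dict.empty := by
  intro k v h
  rw [PySem.Dict.get?_empty] at h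
  cases h

theorem drop_of_ge (W : List Int) (i : Nat) (h : W.length ≤ i) : W.drop i = [] :=
  List.drop_eq_nil_of_le h

theorem bestGo_spec (W : List Int) : ∀ (n i : Nat) (cap : Int) (memo : PySem.Dict (Int × Int) Int),
    W.length - i ≤ n → GoodMemo W memo →
    (bestGo W i cap memo).1 = bestR (W.drop i) cap ∧ GoodMemo W (bestGo W i cap memo).2 := by
  intro n
  induction n with
  | zero =>
    intro i cap memo hn hg
    have hle : W.length ≤ i := by omega
    rw [bestGo, dif_pos hle, drop_of_ge W i hle]
    exact ⟨rfl, hg⟩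
  | succ n ih =>
    intro i cap memo hn hg
    by_cases hle : W.length ≤ i
    · rw [bestGo, dif_pos hle, drop_of_ge W i hle]
      exact ⟨rfl, hg⟩
    · have hi : i < W.length := by omega
      have hdrop : W.drop i = W[i] :: W.drop (i + 1) := List.drop_eq_getElem_cons hi
      have hwi : PySem.List.pyGetD W (i : Int) 0 = W[i] := by
        rw [PySem.List.pyGetD_natCast, List.getD_eq_getElem?_getD, List.getElem?_eq_getElem hi]
        rfl
      rw [bestGo, dif_neg hle]
      cases hget : memo.get? ((i : Int), cap) with
      | some v =>
        obtain ⟨j, hj1, hj2⟩ := hg _ _ hget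
        have hij : i = j := by
          have : ((i : Int)) = (j : Int) := hj1
          exact_mod_cast this
        subst hij
        exact ⟨hj2.symm ▸ rfl, hg⟩
      | none =>
        simp only
        obtain ⟨h1, hg1⟩ := ih (i + 1) cap memo (by omega) hg
        by_cases hw : W[i] ≤ cap
        · obtain ⟨h2, hg2⟩ := ih (i + 1) (cap - W[i]) (bestGo W (i+1) cap memo).2 (by omega) hg1
          rw [hwi, if_pos hw]
          constructor
          · simp only [hdrop, bestR, if_pos hw, h1, h2]
          · intro k v hk
            rw [PySem.Dict.get?_insert] at hk
            split_ifs at hk with hkk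
            · subst hkk
              refine ⟨i, rfl, ?_⟩
              cases hk
              simp only [hdrop, bestR, if_pos hw, h1, h2]
            · exact hg2 _ _ hk
        · rw [hwi, if_neg hw]
          constructor
          · simp only [hdrop, bestR, if_neg hw, h1]
          · intro k v hk
            rw [PySem.Dict.get?_insert] at hk
            split_ifs at hk with hkk
            · subst hkk
              refine ⟨i, rfl, ?_⟩
              cases hk
              simp only [hdrop, bestR, if_neg hw, h1]
            · exact hg1 _ _ hk

theorem alt_eq_bestR (W : List Int) (C : Int) : sksWeightOnly_alt W C = bestR W C := by
  have := bestGo_spec W W.length 0 C PySem.Dict.empty (by omega) (goodMemo_empty W)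
  unfold sksWeightOnly_alt
  rw [this.1, List.drop_zero]

-- ---------- bestR: bounds and characterization by subset sums ----------

theorem bestR_nonneg (W : List Int) (cap : Int) : 0 ≤ bestR W cap := by
  induction W generalizing cap with
  | nil => simp [bestR]
  | cons w ws ih =>
    simp only [bestR]
    split_ifs
    · exact le_trans (ih cap) (le_max_left _ _)
    · exact ih cap

theorem bestR_le (W : List Int) (cap : Int) : bestR W cap ≤ max cap 0 := by
  induction W generalizing cap with
  | nil => simp [bestR]
  | cons w ws ih =>
    simp only [bestR]
    split_ifs with hw
    · have h1 := ih cap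
      have h2 := ih (cap - w)
      have : w + bestR ws (cap - w) ≤ max cap 0 := by
        rcases le_or_gt w 0 with h | h <;> omega
      omega
    · exact ih cap

theorem allSums_nonneg (W : List Int) (hw : ∀ w ∈ W, 0 ≤ w) :
    ∀ s ∈ allSums W, 0 ≤ s := by
  induction W with
  | nil => intro s hs; simp [allSums] at hs; omega
  | cons w ws ih =>
    intro s hs
    simp only [allSums, List.mem_append, List.mem_map] at hs
    rcases hs with hs | ⟨t, ht, rfl⟩
    · exact ih (fun v hv => hw v (List.mem_cons_of_mem _ hv)) s hs
    · have := ih (fun v hv => hw v (List.mem_cons_of_mem _ hv)) t ht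
      have := hw w List.mem_cons_self
      omega

theorem bestR_mem (W : List Int) (cap : Int) (hw : ∀ w ∈ W, 0 ≤ w) (hcap : 0 ≤ cap) :
    bestR W cap ∈ allSums W ∧ bestR W cap ≤ cap := by
  induction W generalizing cap with
  | nil => simp [bestR, allSums, hcap]
  | cons w ws ih =>
    have hw' : ∀ v ∈ ws, 0 ≤ v := fun v hv => hw v (List.mem_cons_of_mem _ hv)
    have hw0 : 0 ≤ w := hw w List.mem_cons_self
    simp only [bestR, allSums]
    split_ifs with hwc
    · obtain ⟨hm1, hb1⟩ := ih cap hw' hcap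
      obtain ⟨hm2, hb2⟩ := ih (cap - w) hw' (by omega)
      rcases max_cases (bestR ws cap) (w + bestR ws (cap - w)) with ⟨he, _⟩ | ⟨he, _⟩
      · rw [he]
        exact ⟨List.mem_append_left _ hm1, hb1⟩
      · rw [he]
        refine ⟨List.mem_append_right _ ?_, by omega⟩
        exact List.mem_map.2 ⟨_, hm2, rfl⟩
    · obtain ⟨hm1, hb1⟩ := ih cap hw' hcap
      exact ⟨List.mem_append_left _ hm1, hb1⟩

theorem bestR_ub (W : List Int) (cap : Int) (hw : ∀ w ∈ W, 0 ≤ w) :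
    ∀ s ∈ allSums W, s ≤ cap → s ≤ bestR W cap := by
  induction W generalizing cap with
  | nil => intro s hs _; simp [allSums] at hs; simp [bestR, hs]
  | cons w ws ih =>
    have hw' : ∀ v ∈ ws, 0 ≤ v := fun v hv => hw v (List.mem_cons_of_mem _ hv)
    have hw0 : 0 ≤ w := hw w List.mem_cons_self
    intro s hs hsc
    simp only [allSums, List.mem_append, List.mem_map] at hs
    simp only [bestR]
    rcases hs with hs | ⟨t, ht, rfl⟩
    · have := ih cap hw' s hs hsc
      split_ifs <;> omega
    · have ht0 := allSums_nonneg ws hw' t ht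
      have hwc : w ≤ cap := by omega
      have := ih (cap - w) hw' t ht (by omega)
      rw [if_pos hwc]
      omega

-- ---------- A side: array invariant (length, per-index characterization) ----------

theorem innerA_length (w C : Int) (S : List Bool) : (innerA w C S).length = S.length := by
  unfold innerA
  generalize (PySem.List.pyRange C 0 (-1)) = js
  induction js generalizing S with
  | nil => rfl
  | cons j js ih =>
    simp only [List.foldl_cons]
    rw [ih]
    split_ifs <;> simp

-- one write of A's inner loop: only index n changes, by an or-mask read from index n-w
theorem stepA_getD (w : Int) (S : List Bool) (n : Nat) (hn : n < S.length)
    (h1 : 1 ≤ n) :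
    ∀ (m : Nat),
    ((if ((n : Nat) : Int) ≥ w then
        (if PySem.List.pyGetD S (((n : Nat) : Int) - w) false then
          S.set ((n : Nat) : Int).toNat true else S)
      else S).getD m false)
    = if m = n then
        S.getD n false || (decide (w ≤ ((n : Nat) : Int)) && S.getD (((n : Nat) : Int) - w).toNat false)
      else S.getD m false := by
  intro m
  by_cases hge : w ≤ ((n : Nat) : Int)
  · rw [if_pos hge]
    rw [PySem.List.pyGetD_of_nonneg _ _ (by omega)]
    by_cases hb : S.getD (((n : Nat) : Int) - w).toNat false = true
    · rw [if_pos hb]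
      by_cases hmn : m = n
      · subst hmn
        rw [if_pos rfl]
        simp only [List.getD_eq_getElem?_getD, List.getElem?_set, Int.toNat_natCast,
          if_pos hn]
        simp only [ite_true, Option.getD_some]
        symm
        simp only [Bool.or_eq_true, Bool.and_eq_true, decide_eq_true_eq]
        exact Or.inr ⟨hge, by simpa [List.getD_eq_getElem?_getD] using hb⟩
      · rw [if_neg hmn]
        simp only [List.getD_eq_getElem?_getD, List.getElem?_set, Int.toNat_natCast]
        rw [if_neg (fun h => hmn h.symm)]
    · rw [if_neg hb]
      by_cases hmn : m = n
      · subst hmn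
        rw [if_pos rfl]
        have hb' : S.getD (((m : Nat) : Int) - w).toNat false = false := by
          cases h : S.getD (((m : Nat) : Int) - w).toNat false
          · rfl
          · exact absurd h hb
        rw [hb']
        simp
      · rw [if_neg hmn]
  · rw [if_neg hge]
    by_cases hmn : m = n
    · subst hmn
      rw [if_pos rfl]
      simp [hge]
    · rw [if_neg hmn]

-- characterization of the inner (backwards) loop of A, for a countdown starting at k
theorem innerA_core (w : Int) (hw : 0 ≤ w) :
    ∀ (k : Nat) (S : List Bool), k < S.length → ∀ (j : Nat),
    ((PySem.List.pyRange (k : Int) 0 (-1)).foldl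
      (fun S j => if j ≥ w then
          (if PySem.List.pyGetD S (j - w) false then S.set j.toNat true else S)
        else S) S).getD j false
    = if 1 ≤ j ∧ j ≤ k then
        (S.getD j false || (decide (w ≤ (j : Int)) && S.getD ((j : Int) - w).toNat false))
      else S.getD j false := by
  intro k
  induction k with
  | zero =>
    intro S hk j
    rw [PySem.List.pyRange_neg_one_eq_nil (by omega)]
    have hno : ¬(1 ≤ j ∧ j ≤ 0) := by omega
    simp only [List.foldl_nil]
    rw [if_neg hno]
  | succ k ih =>
    intro S hk j
    rw [PySem.List.pyRange_neg_one_cons (by exact_mod_cast Nat.succ_pos k)]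
    have hcast : ((k + 1 : Nat) : Int) - 1 = (k : Int) := by push_cast; ring
    simp only [List.foldl_cons, hcast]
    have hstep := stepA_getD w S (k + 1) hk (Nat.succ_le_succ (Nat.zero_le k))
    set S1 := (if ((k + 1 : Nat) : Int) ≥ w then
        (if PySem.List.pyGetD S (((k + 1 : Nat) : Int) - w) false then
          S.set ((k + 1 : Nat) : Int).toNat true else S)
      else S) with hS1def
    have hS1len : S1.length = S.length := by
      rw [hS1def]
      split_ifs <;> simp
    rw [ih S1 (by omega)]
    by_cases hj1 : 1 ≤ j ∧ j ≤ k
    · -- j strictly below the freshly written index k+1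
      have hj2 : 1 ≤ j ∧ j ≤ k + 1 := by omega
      rw [if_pos hj1, if_pos hj2, hstep j]
      rw [if_neg (by omega : ¬ j = k + 1)]
      by_cases hwj : w ≤ (j : Int)
      · have hlt : ((j : Int) - w).toNat ≠ k + 1 := by omega
        rw [hstep ((j : Int) - w).toNat, if_neg hlt]
      · simp [hwj]
    · rw [if_neg hj1]
      by_cases hjk : j = k + 1
      · subst hjk
        rw [if_pos (by omega : 1 ≤ k + 1 ∧ k + 1 ≤ k + 1)]
        have := hstep (k + 1)
        rw [if_pos rfl] at this
        exact this
      · rw [if_neg (by omega : ¬(1 ≤ j ∧ j ≤ k + 1))]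
        rw [hstep j, if_neg hjk]

theorem innerA_getD (w C : Int) (hw : 0 ≤ w) (hC : 0 ≤ C) (S : List Bool)
    (hlen : S.length = C.toNat + 1) (j : Nat) :
    (innerA w C S).getD j false
    = if 1 ≤ j ∧ j ≤ C.toNat then
        (S.getD j false || (decide (w ≤ (j : Int)) && S.getD ((j : Int) - w).toNat false))
      else S.getD j false := by
  unfold innerA
  have hck : (C : Int) = ((C.toNat : Nat) : Int) := (Int.toNat_of_nonneg hC).symm
  rw [hck]
  exact innerA_core w hw C.toNat S (by omega) j

-- ---------- ghost reachable-set: membership lemmas ----------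

theorem mem_addsB_aux (w C : Int) : ∀ (R A : List Int) (x : Int),
    (x ∈ R.foldl (fun A r => if r + w ≤ C then PySem.Set.add A (r + w) else A) A ↔
     x ∈ A ∨ ∃ r ∈ R, r + w ≤ C ∧ x = r + w) := by
  intro R
  induction R with
  | nil => simp
  | cons r R ih =>
    intro A x
    simp only [List.foldl_cons]
    rw [ih]
    by_cases h : r + w ≤ C
    · simp only [if_pos h, PySem.Set.mem_add, List.mem_cons]
      constructor
      · rintro ((hx | rfl) | ⟨s, hs, hle, rfl⟩)
        · exact Or.inl hx
        · exact Or.inr ⟨r, Or.inl rfl, h, rfl⟩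
        · exact Or.inr ⟨s, Or.inr hs, hle, rfl⟩
      · rintro (hx | ⟨s, (rfl | hs), hle, rfl⟩)
        · exact Or.inl (Or.inl hx)
        · exact Or.inl (Or.inr rfl)
        · exact Or.inr ⟨s, hs, hle, rfl⟩
    · simp only [if_neg h, List.mem_cons]
      constructor
      · rintro (hx | ⟨s, hs, hle, rfl⟩)
        · exact Or.inl hx
        · exact Or.inr ⟨s, Or.inr hs, hle, rfl⟩
      · rintro (hx | ⟨s, (rfl | hs), hle, rfl⟩)
        · exact Or.inl hx
        · exact absurd hle h
        · exact Or.inr ⟨s, hs, hle, rfl⟩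

theorem mem_addsB (w C : Int) (R : List Int) (x : Int) :
    x ∈ addsB w C R ↔ ∃ r ∈ R, r + w ≤ C ∧ x = r + w := by
  unfold addsB
  rw [mem_addsB_aux]
  simp

theorem mem_stepB (w C : Int) (R : PySem.Set Int) (x : Int) :
    x ∈ PySem.Set.union R (addsB w C R) ↔ x ∈ R ∨ (x - w ∈ R ∧ x ≤ C) := by
  rw [PySem.Set.mem_union, mem_addsB]
  constructor
  · rintro (hx | ⟨r, hr, hle, rfl⟩)
    · exact Or.inl hx
    · exact Or.inr ⟨by simpa using hr, hle⟩
  · rintro (hx | ⟨hr, hle⟩)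
    · exact Or.inl hx
    · exact Or.inr ⟨x - w, hr, by omega, by omega⟩

-- the coupling invariant between A's boolean array and the ghost reachable set
def InvAB (C : Int) (S : List Bool) (R : List Int) : Prop :=
  S.length = C.toNat + 1 ∧ (0 : Int) ∈ R ∧ R.Nodup ∧ (∀ r ∈ R, 0 ≤ r ∧ r ≤ C) ∧
  (∀ j : Nat, j ≤ C.toNat → (S.getD j false = true ↔ (j : Int) ∈ R))

theorem InvAB_step (C w : Int) (hC : 0 ≤ C) (hw : 0 ≤ w) (S : List Bool) (R : List Int)
    (h : InvAB C S R) : InvAB C (innerA w C S) (PySem.Set.union R (addsB w C R)) := by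
  obtain ⟨hlen, h0, hnd, hbd, hmem⟩ := h
  refine ⟨by rw [innerA_length]; exact hlen,
          (PySem.Set.mem_union _ _ _).2 (Or.inl h0),
          PySem.Set.nodup_union _ _ hnd, ?_, ?_⟩
  · intro r hr
    rcases (mem_stepB w C R r).1 hr with hr' | ⟨hr', hrC⟩
    · exact hbd r hr'
    · have := hbd _ hr'
      constructor <;> omega
  · intro j hj
    rw [innerA_getD w C hw hC S hlen j, mem_stepB]
    by_cases hj1 : 1 ≤ j
    · rw [if_pos ⟨hj1, hj⟩]
      by_cases hwj : w ≤ (j : Int)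
      · have hcast : ((((j : Nat) : Int) - w).toNat : Int) = ((j : Nat) : Int) - w :=
          Int.toNat_of_nonneg (by omega)
        have hsub : (((j : Nat) : Int) - w).toNat ≤ C.toNat := by omega
        have h2 := hmem _ hsub
        rw [hcast] at h2
        have hjC : ((j : Nat) : Int) ≤ C := by omega
        simp only [Bool.or_eq_true, decide_eq_true hwj, Bool.true_and]
        rw [hmem j hj, h2]
        constructor
        · rintro (h | h)
          · exact Or.inl h
          · exact Or.inr ⟨h, hjC⟩
        · rintro (h | ⟨h, _⟩)
          · exact Or.inl h
          · exact Or.inr h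
      · have hneg : ¬ (((j : Nat) : Int) - w ∈ R) := fun hm => by
          have := hbd _ hm; omega
        rw [decide_eq_false hwj]
        simp only [Bool.false_and, Bool.or_false]
        rw [hmem j hj]
        constructor
        · exact Or.inl
        · rintro (h | ⟨h, _⟩)
          · exact h
          · exact absurd h hneg
    · have hj0 : j = 0 := by omega
      subst hj0
      rw [if_neg (by omega)]
      rw [hmem 0 hj]
      constructor
      · exact Or.inl
      · rintro (h | ⟨hneg, _⟩)
        · exact h
        · have := hbd _ hneg
          have hw0 : w = 0 := by omega
          simpa [hw0] using hneg

theorem InvAB_fold (C : Int) (hC : 0 ≤ C) :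
    ∀ (W : List Int), (∀ w ∈ W, 0 ≤ w) → ∀ (S : List Bool) (R : List Int), InvAB C S R →
    InvAB C (W.foldl (fun S w => innerA w C S) S)
            (W.foldl (fun R w => PySem.Set.union R (addsB w C R)) R) := by
  intro W
  induction W with
  | nil => exact fun _ S R h => h
  | cons w W ih =>
    intro hw S R h
    simp only [List.foldl_cons]
    exact ih (fun v hv => hw v (List.mem_cons_of_mem _ hv)) _ _
      (InvAB_step C w hC (hw w List.mem_cons_self) S R h)

theorem getD_map_false {α : Type} (l : List α) (m : Nat) :
    (l.map (fun _ => false)).getD m false = false := by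
  rw [List.getD_eq_getElem?_getD, List.getElem?_map]
  cases l[m]? <;> rfl

theorem InvAB_init (C : Int) (hC : 0 ≤ C) :
    InvAB C (true :: (PySem.List.pyRange 1 (C + 1) 1).map (fun _ => false)) [0] := by
  refine ⟨?_, by simp, by simp, ?_, ?_⟩
  · simp only [List.length_cons, List.length_map, PySem.List.length_pyRange_one]
    omega
  · rintro r hr
    simp only [List.mem_singleton] at hr
    omega
  · intro j _
    cases j with
    | zero => simp
    | succ j =>
      simp only [List.getD_cons_succ, getD_map_false, List.mem_singleton]
      constructor
      · intro h; cases h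
      · intro h; omega

-- ---------- ghost reachable-set ↔ subset sums ----------

theorem stepB_bounds (w C : Int) (hw : 0 ≤ w) (R : PySem.Set Int)
    (hR : ∀ r ∈ R, 0 ≤ r ∧ r ≤ C) :
    ∀ r ∈ PySem.Set.union R (addsB w C R), 0 ≤ r ∧ r ≤ C := by
  intro r hr
  rcases (mem_stepB w C R r).1 hr with hr' | ⟨hr', hrC⟩
  · exact hR r hr'
  · have := hR _ hr'
    constructor <;> omega

theorem fold_mem_iff (C : Int) :
    ∀ (W : List Int), (∀ w ∈ W, 0 ≤ w) →
    ∀ (R : PySem.Set Int), (∀ r ∈ R, 0 ≤ r ∧ r ≤ C) → ∀ (x : Int),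
    (x ∈ W.foldl (fun R w => PySem.Set.union R (addsB w C R)) R ↔
     ∃ r ∈ R, ∃ s ∈ allSums W, x = r + s ∧ x ≤ C) := by
  intro W
  induction W with
  | nil =>
    intro _ R hR x
    simp only [List.foldl_nil, allSums, List.mem_singleton]
    constructor
    · intro hx
      exact ⟨x, hx, 0, rfl, by omega, (hR x hx).2⟩
    · rintro ⟨r, hr, s, rfl, rfl, _⟩
      simpa using hr
  | cons w W ih =>
    intro hw R hR x
    have hw0 : 0 ≤ w := hw w List.mem_cons_self
    have hw' : ∀ v ∈ W, 0 ≤ v := fun v hv => hw v (List.mem_cons_of_mem _ hv)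
    simp only [List.foldl_cons]
    rw [ih hw' _ (stepB_bounds w C hw0 R hR) x]
    constructor
    · rintro ⟨r', hr', s, hs, rfl, hxC⟩
      rcases (mem_stepB w C R r').1 hr' with hr | ⟨hr, _⟩
      · exact ⟨r', hr, s, List.mem_append_left _ hs, rfl, hxC⟩
      · refine ⟨r' - w, hr, w + s, List.mem_append_right _ (List.mem_map.2 ⟨s, hs, rfl⟩),
          by omega, hxC⟩
    · rintro ⟨r, hr, s, hs, rfl, hxC⟩
      simp only [allSums, List.mem_append, List.mem_map] at hs
      rcases hs with hs | ⟨t, ht, rfl⟩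
      · exact ⟨r, (mem_stepB w C R r).2 (Or.inl hr), s, hs, rfl, hxC⟩
      · have ht0 := allSums_nonneg W hw' t ht
        have hrw : r + w ≤ C := by omega
        refine ⟨r + w, (mem_stepB w C R (r + w)).2 (Or.inr ⟨by simpa using hr, hrw⟩),
          t, ht, by omega, hxC⟩

-- ---------- max extraction ----------

theorem max_val (l : List Int) (m : Int) (hm : m ∈ l) (hb : ∀ x ∈ l, x ≤ m) :
    PySem.List.max? l (fun x => x) = some m := by
  cases h : PySem.List.max? l (fun x => x) with
  | none =>
    rw [PySem.List.max?_eq_none_iff] at h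
    subst h; cases hm
  | some m' =>
    have h1 : m' ∈ l := PySem.List.max?_mem h
    have h2 : m ≤ m' := PySem.List.max?_isMax h m hm
    have h3 : m' ≤ m := hb m' h1
    simp only [Option.some.injEq]
    omega

-- final extraction: under the invariant, A's result is the max of the ghost set
theorem final_eq (C : Int) (hC : 0 ≤ C) (S : List Bool) (R : List Int) (h : InvAB C S R) :
    ((PySem.List.max? ((PySem.List.pyRange 0 (S.length : Int) 1).filter
        (fun j => PySem.List.pyGetD S j false)) (fun x => x)).getD 0)
    = (PySem.List.max? R (fun x => x)).getD 0 := by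
  obtain ⟨hlen, h0, hnd, hbd, hmem⟩ := h
  have hiff : ∀ x : Int,
      (x ∈ (PySem.List.pyRange 0 (S.length : Int) 1).filter
        (fun j => PySem.List.pyGetD S j false)) ↔ x ∈ R := by
    intro x
    rw [List.mem_filter, PySem.List.mem_pyRange_one]
    constructor
    · rintro ⟨⟨hx0, hxlt⟩, hp⟩
      rw [PySem.List.pyGetD_of_nonneg _ _ hx0] at hp
      have hxle : x.toNat ≤ C.toNat := by omega
      have := (hmem x.toNat hxle).1 hp
      rwa [Int.toNat_of_nonneg hx0] at this
    · intro hx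
      obtain ⟨hx0, hxC⟩ := hbd x hx
      refine ⟨⟨hx0, by omega⟩, ?_⟩
      rw [PySem.List.pyGetD_of_nonneg _ _ hx0]
      apply (hmem x.toNat (by omega)).2
      rwa [Int.toNat_of_nonneg hx0]
  cases hmr : PySem.List.max? R (fun x => x) with
  | none =>
    rw [PySem.List.max?_eq_none_iff] at hmr
    subst hmr; cases h0
  | some m =>
    have hmR := PySem.List.max?_mem hmr
    have hmax := PySem.List.max?_isMax hmr
    rw [max_val _ m ((hiff m).2 hmR) (fun x hx => hmax x ((hiff x).1 hx))]

-- C ≤ 0: A's inner loop is empty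
theorem foldA_id (C : Int) (hC : C ≤ 0) (W : List Int) (S : List Bool) :
    W.foldl (fun S w => innerA w C S) S = S := by
  induction W generalizing S with
  | nil => rfl
  | cons w W ih =>
    simp only [List.foldl_cons]
    have : innerA w C S = S := by
      unfold innerA
      rw [PySem.List.pyRange_neg_one_eq_nil hC]
      rfl
    rw [this, ih]

-- ===== VERDICT (by name: the statement is the Claim_ definition above) =====
theorem sksWeightOnly_spec : Claim_equal_sksWeightOnly := by
  intro W C _ hpre
  unfold Spec_sksWeightOnly
  rw [alt_eq_bestR]
  unfold sksWeightOnly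
  dsimp only
  by_cases hC : C ≤ 0
  · -- A's inner loop is empty and A returns 0; bestR is squeezed to 0
    rw [foldA_id C hC, PySem.List.pyRange_one_eq_nil (by omega : C + 1 ≤ 1)]
    have h1 := bestR_nonneg W C
    have h2 := bestR_le W C
    have : bestR W C = 0 := by
      rcases max_cases C 0 with ⟨he, _⟩ | ⟨he, _⟩ <;> omega
    rw [this]
    decide
  · have hw : ∀ w ∈ W, 0 ≤ w := by
      rcases hpre with h | h
      · omega
      · exact h
    have hC0 : 0 ≤ C := by omega
    have hinv := InvAB_fold C hC0 W hw _ _ (InvAB_init C hC0)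
    rw [final_eq C hC0 _ _ hinv]
    -- the ghost set's max is bestR W C
    have hmemiff := fold_mem_iff C W hw [0] (by intro r hr; simp at hr; omega)
    have hmem : ∀ x : Int,
        x ∈ W.foldl (fun R w => PySem.Set.union R (addsB w C R)) [0] ↔
        x ∈ allSums W ∧ x ≤ C := by
      intro x
      rw [hmemiff x]
      constructor
      · rintro ⟨r, hr, s, hs, rfl, hxC⟩
        simp only [List.mem_singleton] at hr
        subst hr
        constructor
        · simpa using hs
        · omega
      · rintro ⟨hs, hxC⟩
        exact ⟨0, List.mem_singleton.2 rfl, x, hs, by omega, hxC⟩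
    obtain ⟨hbm, hbl⟩ := bestR_mem W C hw hC0
    rw [max_val _ (bestR W C) ((hmem _).2 ⟨hbm, hbl⟩)
        (fun x hx => by
          obtain ⟨hxs, hxC⟩ := (hmem x).1 hx
          exact bestR_ub W C hw x hxs hxC)]
    rfl
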